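-- pv_equiv track=rewrite | github.com/SnapMine/SnapMine | scripts/generate_block_states_data.py | compute_coefficients
-- ===== SOURCE A (Python) =====
-- def compute_coefficients(properties: dict) -> list[int]:
--     """
--     Calculates the coefficient array for a list of properties.
--     Coefficients are used to calculate a unique ID for each property combination.
--
--     Args:
--         properties (dict): A dictionary of block properties.
--
--     Returns:
--         list[int]: The list of calculated coefficients.
--     """
--     coefficients = []
--     property_values = list(properties.values())
--
--     multiplier = 1
--
--     for prop in reversed(property_values):
--         coefficients.insert(0, multiplier)
--         multiplier *= len(prop)
--
--     return coefficients
-- ===== SOURCE B (Python) =====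
-- import math
--
-- def compute_coefficients(properties: dict) -> list[int]:
--     lengths = [len(v) for v in properties.values()]
--     return [math.prod(lengths[i + 1:]) for i in range(len(lengths))]
-- ===== Notes on version B (the rewrite author's own statement) =====
-- stated objective: simpler
-- what changed: Replaces A's reverse-order accumulator loop with front insertion by a direct per-index formula: each coefficient is the product of the suffix of the lengths table.
import Mathlib
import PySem

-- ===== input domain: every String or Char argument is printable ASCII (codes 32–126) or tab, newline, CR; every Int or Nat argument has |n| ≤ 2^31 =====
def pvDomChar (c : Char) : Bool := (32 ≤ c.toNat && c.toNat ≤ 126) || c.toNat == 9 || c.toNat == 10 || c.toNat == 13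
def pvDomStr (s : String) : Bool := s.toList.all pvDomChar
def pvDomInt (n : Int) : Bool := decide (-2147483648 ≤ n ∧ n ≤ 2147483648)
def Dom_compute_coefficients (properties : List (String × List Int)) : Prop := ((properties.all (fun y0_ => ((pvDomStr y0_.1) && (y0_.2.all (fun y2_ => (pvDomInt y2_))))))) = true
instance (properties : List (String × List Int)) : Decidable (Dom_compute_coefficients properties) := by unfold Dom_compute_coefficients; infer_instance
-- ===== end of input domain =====

-- ===== PORT A =====
-- A: loop over reversed values, prepending the running multiplier each step.
def compute_coefficients (properties : List (String × List Int)) : List Int :=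
  let property_values := properties.map Prod.snd
  let st := property_values.reverse.foldl
    (fun (st : List Int × Int) prop => (st.2 :: st.1, st.2 * (prop.length : Int)))
    ([], 1)
  st.1

-- ===== PORT B =====
-- B: lengths table first, then each coefficient independently as the product of its suffix.
def compute_coefficients_alt (properties : List (String × List Int)) : List Int :=
  let lengths := properties.map (fun p => ((p.2).length : Int))
  (List.range lengths.length).map (fun i => (lengths.drop (i + 1)).prod)

-- ===== PRECONDITION & SPEC =====
def Spec_compute_coefficients (properties : List (String × List Int)) (out : List Int) : Prop := out = compute_coefficients_alt properties
instance (properties : List (String × List Int)) (out : List Int) : Decidable (Spec_compute_coefficients properties out) := by unfold Spec_compute_coefficients; infer_instance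

-- ===== CLAIM (what is proved, stated in full; the proofs are below) =====
def Claim_equal_compute_coefficients : Prop := ∀ (properties : List (String × List Int)), Dom_compute_coefficients properties → Spec_compute_coefficients properties (compute_coefficients properties)

-- ===== LEMMAS AND PROOFS =====

lemma loopA (vs : List (List Int)) (acc : List Int) (m : Int) :
    vs.reverse.foldl
      (fun (st : List Int × Int) prop => (st.2 :: st.1, st.2 * (prop.length : Int)))
      (acc, m)
    = ((List.range vs.length).map
        (fun i => m * ((vs.drop (i + 1)).map (fun v => ((v.length : Int)))).prod) ++ acc,
       m * (vs.map (fun v => ((v.length : Int)))).prod) := by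
  induction vs generalizing acc m with
  | nil => simp
  | cons v rest ih =>
    simp only [List.reverse_cons, List.foldl_append, ih, List.foldl_cons, List.foldl_nil]
    simp [List.range_succ_eq_map, List.map_map, Function.comp, mul_comm, mul_left_comm]

-- ===== VERDICT (by name: the statement is the Claim_ definition above) =====
theorem compute_coefficients_spec : Claim_equal_compute_coefficients := by
  intro properties _
  unfold Spec_compute_coefficients compute_coefficients compute_coefficients_alt
  simp only [loopA, List.append_nil, List.length_map, List.map_map, one_mul]
  refine List.map_congr_left ?_
  intro i _
  simp [Function.comp_def]
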